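-- pv_equiv track=rewrite | github.com/drpeterfoster/adventofcode24 | day19.py | part1
-- ===== SOURCE A (Python) =====
-- from collections import defaultdict
-- from functools import lru_cache
--
-- def parse_data(data: str):
--     towels, patterns = data.strip().split("\n\n")
--     towels = towels.split(", ")
--     patterns = patterns.split("\n")
--     return towels, patterns
--
-- def find_combinations(substrings, target):
--     @lru_cache(None)
--     def backtrack(start):
--         if start == len(target):
--             return True
--         for substring in substrings.get(target[start], []):
--             if target.startswith(substring, start):
--                 out = backtrack(start + len(substring))
--                 if out:
--                     return True
--         return False
--
--     result = backtrack(0)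
--     return result
--
-- def index_towels(towels, pattern):
--     towels_ = [t for t in towels if t in pattern]
--     i2t = defaultdict(list)
--     for t in towels_:
--         i2t[t[0]].append(t)
--     return i2t
--
-- def part1(data=None):
--     towels, patterns = parse_data(data)
--     result = 0
--     for pattern in patterns:
--         towels_ = index_towels(towels, pattern)
--         makeable = find_combinations(towels_, pattern)
--         if makeable:
--             result += 1
--     return result
-- ===== SOURCE B (Python) =====
-- def part1(data=None):
--     towels_block, patterns_block = data.strip().split("\n\n")
--     towels = towels_block.split(", ")
--     count = 0
--     for pattern in patterns_block.split("\n"):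
--         n = len(pattern)
--         dp = [False] * (n + 1)
--         dp[n] = True
--         for i in range(n - 1, -1, -1):
--             dp[i] = any(pattern.startswith(t, i) and dp[i + len(t)] for t in towels)
--         count += dp[0]
--     return count
-- ===== Notes on version B (the rewrite author's own statement) =====
-- stated objective: simpler
-- what changed: Replaces the per-pattern first-character towel index plus memoized recursive backtracking with a bottom-up boolean suffix-DP table filled right-to-left over the unfiltered towel list.
import Mathlib
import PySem

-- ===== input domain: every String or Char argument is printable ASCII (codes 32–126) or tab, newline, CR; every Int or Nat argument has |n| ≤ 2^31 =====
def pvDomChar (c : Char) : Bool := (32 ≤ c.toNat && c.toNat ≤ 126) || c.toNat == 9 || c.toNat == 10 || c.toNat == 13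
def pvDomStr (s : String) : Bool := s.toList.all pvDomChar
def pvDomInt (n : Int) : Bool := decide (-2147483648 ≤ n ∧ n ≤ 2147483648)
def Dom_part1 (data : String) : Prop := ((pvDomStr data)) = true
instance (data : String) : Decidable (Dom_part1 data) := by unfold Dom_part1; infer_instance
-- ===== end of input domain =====

-- B replaces A's per-pattern first-character towel index + memoized recursive backtracking by a
-- bottom-up boolean DP over suffix positions; same return value wherever A returns (Pre_ below).

-- ===== PORT A =====

-- pattern.startswith(sub, start): exact for the 0 ≤ start used here
def pyStartsFrom (tgt sub : List Char) (start : Nat) : Bool :=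
  sub.isPrefixOf (tgt.drop start)

-- index_towels: filter towels occurring in the pattern, group by first character (defaultdict append)
def indexTowels (towels : List (List Char)) (pattern : List Char) :
    PySem.Dict Char (List (List Char)) :=
  let towels_ := towels.filter (fun t => PySem.Chars.isIn t pattern)
  towels_.foldl (fun d t =>
    match t with
    | [] => d            -- Python raises IndexError on t[0] here; excluded by Pre_part1
    | c :: _ => d.modify c [] (fun ls => ls ++ [t])) PySem.Dict.empty

-- backtrack(start), memoization dropped (value-irrelevant); fuel tgt.length+1 never runs out,
-- every stored towel being nonempty (the [] case above is skipped)
def backtrackA (i2t : PySem.Dict Char (List (List Char))) (tgt : List Char) :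
    Nat → Nat → Bool
  | 0, _ => false
  | fuel + 1, start =>
    if start = tgt.length then true
    else
      match tgt[start]? with
      | none => false    -- unreachable: start < len(target) here
      | some c =>
        (i2t.getD c []).any (fun sub =>
          pyStartsFrom tgt sub start && backtrackA i2t tgt fuel (start + sub.length))

def part1 (data : String) : Int :=
  match PySem.Chars.splitOn (PySem.Chars.strip data.toList) ['\n', '\n'] with
  | [towelsBlock, patternsBlock] =>
    let towels := PySem.Chars.splitOn towelsBlock [',', ' ']
    let patterns := PySem.Chars.splitOn patternsBlock ['\n']
    patterns.foldl (fun result pattern =>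
      let towels_ := indexTowels towels pattern
      let makeable := backtrackA towels_ pattern (pattern.length + 1) 0
      if makeable then result + 1 else result) 0
  | _ => 0               -- Python raises ValueError (unpacking); excluded by Pre_part1

-- ===== PORT B =====

-- B-side port of pattern.startswith(t, i) (kept separate from A's helper)
def pyStartsFromB (tgt sub : List Char) (start : Nat) : Bool :=
  sub.isPrefixOf (tgt.drop start)

-- dp list of Source B built back to front: dpListB k = [dp[n-k], …, dp[n]] after the loop has
-- processed i = n-1 … n-k; dp[i + len t] is rest.getD (len t - 1); Python reads the still-False
-- dp[i] itself when t is empty — the [] branch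
def dpListB (towels : List (List Char)) (tgt : List Char) : Nat → List Bool
  | 0 => [true]
  | k + 1 =>
    let rest := dpListB towels tgt k
    (towels.any (fun t =>
      pyStartsFromB tgt t (tgt.length - (k + 1)) &&
      match t with
      | [] => false
      | _ :: _ => rest.getD (t.length - 1) false)) :: rest

def part1_alt (data : String) : Int :=
  let parts := PySem.Chars.splitOn (PySem.Chars.strip data.toList) ['\n', '\n']
  -- 'towels_block, patterns_block = …' unpack: exactly two parts, else ValueError (excluded by Pre_part1)
  if parts.length = 2 then
    let towels := PySem.Chars.splitOn (parts.getD 0 []) [',', ' ']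
    (PySem.Chars.splitOn (parts.getD 1 []) ['\n']).foldl (fun count pattern =>
      count + (if (dpListB towels pattern pattern.length).getD 0 false then 1 else 0)) 0
  else 0

-- ===== PRECONDITION & SPEC =====
-- Pre_ excludes exactly the inputs where A raises: the blank-line split not giving exactly two
-- blocks (ValueError on unpacking) or an empty towel (IndexError on t[0] in index_towels).
def Pre_part1 (data : String) : Prop :=
  (PySem.Chars.splitOn (PySem.Chars.strip data.toList) ['\n', '\n']).length = 2 ∧
  ∀ t ∈ PySem.Chars.splitOn
      ((PySem.Chars.splitOn (PySem.Chars.strip data.toList) ['\n', '\n']).headI) [',', ' '],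
    t ≠ []
instance (data : String) : Decidable (Pre_part1 data) := by unfold Pre_part1; infer_instance

def pvWitness_part1 : String := "r, g, rg\n\nrgr\nbw\n"

def Spec_part1 (data : String) (out : Int) : Prop := out = part1_alt data
instance (data : String) (out : Int) : Decidable (Spec_part1 data out) := by unfold Spec_part1; infer_instance

-- ===== CLAIM (what is proved, stated in full; the proofs are below) =====
def Claim_equal_part1 : Prop := ∀ (data : String), Dom_part1 data → Pre_part1 data → Spec_part1 data (part1 data)

-- ===== LEMMAS AND PROOFS =====

-- one-step unfolding of backtrackA (rw-friendly: rewrites only the outer call)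
theorem bt_step (i2t : PySem.Dict Char (List (List Char))) (tgt : List Char)
    (fuel start : Nat) :
    backtrackA i2t tgt (fuel + 1) start =
      if start = tgt.length then true
      else
        match tgt[start]? with
        | none => false
        | some c =>
          (i2t.getD c []).any (fun sub =>
            pyStartsFrom tgt sub start && backtrackA i2t tgt fuel (start + sub.length)) := rfl

-- membership in a bucket of the index-building fold
theorem mem_getD_indexFold (l : List (List Char)) (d : PySem.Dict Char (List (List Char)))
    (t : List Char) (c : Char) :
    t ∈ (l.foldl (fun d t =>
      match t with
      | [] => d
      | c0 :: _ => d.modify c0 [] (fun ls => ls ++ [t])) d).getD c [] ↔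
      t ∈ d.getD c [] ∨ (t ∈ l ∧ ∃ r, t = c :: r) := by
  induction l generalizing d with
  | nil => simp
  | cons x l ih =>
    cases x with
    | nil =>
      simp only [List.foldl_cons]
      rw [ih]
      simp only [List.mem_cons]
      constructor
      · rintro (h | ⟨h1, h2⟩)
        · exact Or.inl h
        · exact Or.inr ⟨Or.inr h1, h2⟩
      · rintro (h | ⟨h1 | h1, r, hr⟩)
        · exact Or.inl h
        · rw [h1] at hr; simp at hr
        · exact Or.inr ⟨h1, r, hr⟩
    | cons c0 r0 =>
      simp only [List.foldl_cons]
      rw [ih, PySem.Dict.getD_modify]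
      split_ifs with hc
      · subst hc
        simp only [List.mem_append, List.mem_cons]
        constructor
        · rintro ((h | h | h) | ⟨h1, h2⟩)
          · exact Or.inl h
          · exact Or.inr ⟨Or.inl h, r0, h⟩
          · simp at h
          · exact Or.inr ⟨Or.inr h1, h2⟩
        · rintro (h | ⟨h1 | h1, r, hr⟩)
          · exact Or.inl (Or.inl h)
          · exact Or.inl (Or.inr (Or.inl h1))
          · exact Or.inr ⟨h1, r, hr⟩
      · simp only [List.mem_cons]
        constructor
        · rintro (h | ⟨h1, h2⟩)
          · exact Or.inl h
          · exact Or.inr ⟨Or.inr h1, h2⟩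
        · rintro (h | ⟨h1 | h1, r, hr⟩)
          · exact Or.inl h
          · exact absurd (by rw [h1] at hr; exact (List.cons.injEq _ _ _ _ ▸ hr).1.symm :
              c = c0) hc
          · exact Or.inr ⟨h1, r, hr⟩

theorem mem_bucket (ts : List (List Char)) (tgt : List Char) (t : List Char) (c : Char) :
    t ∈ (indexTowels ts tgt).getD c [] ↔
      t ∈ ts ∧ PySem.Chars.isIn t tgt = true ∧ ∃ r, t = c :: r := by
  unfold indexTowels
  rw [mem_getD_indexFold]
  simp only [PySem.Dict.getD_empty, List.not_mem_nil, false_or, List.mem_filter]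
  tauto

theorem bt_overflow (i2t : PySem.Dict Char (List (List Char))) (tgt : List Char)
    (fuel start : Nat) (h : tgt.length < start) :
    backtrackA i2t tgt fuel start = false := by
  cases fuel with
  | zero => rfl
  | succ f =>
    simp only [backtrackA]
    rw [if_neg (by omega), List.getElem?_eq_none (by omega)]

theorem bt_fuel (i2t : PySem.Dict Char (List (List Char))) (tgt : List Char)
    (hB : ∀ c t, t ∈ i2t.getD c [] → t ≠ []) :
    ∀ k start fuel fuel', tgt.length - start ≤ k → tgt.length - start < fuel →
      tgt.length - start < fuel' →
      backtrackA i2t tgt fuel start = backtrackA i2t tgt fuel' start := by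
  intro k
  induction k with
  | zero =>
    intro start fuel fuel' hk h1 h2
    cases fuel with
    | zero => omega
    | succ f =>
      cases fuel' with
      | zero => omega
      | succ f' =>
        by_cases hs : start = tgt.length
        · simp only [backtrackA, if_pos hs]
        · rw [bt_overflow _ _ _ _ (by omega), bt_overflow _ _ _ _ (by omega)]
  | succ k ih =>
    intro start fuel fuel' hk h1 h2
    cases fuel with
    | zero => omega
    | succ f =>
      cases fuel' with
      | zero => omega
      | succ f' =>
        by_cases hs : start = tgt.length
        · simp only [backtrackA, if_pos hs]
        · by_cases hlt : tgt.length < start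
          · rw [bt_overflow _ _ _ _ hlt, bt_overflow _ _ _ _ hlt]
          · simp only [backtrackA, if_neg hs]
            rw [List.getElem?_eq_getElem (by omega)]
            apply PySem.List.any_congr_mem
            intro t ht
            have htne := hB _ _ ht
            have hl : 0 < t.length := List.length_pos_iff.mpr htne
            congr 1
            exact ih (start + t.length) f f' (by omega) (by omega) (by omega)

theorem dp_eq_bt (ts : List (List Char)) (tgt : List Char) :
    ∀ k, k ≤ tgt.length → ∀ j, j ≤ k →
      (dpListB ts tgt k).getD j false =
        backtrackA (indexTowels ts tgt) tgt (k - j + 1) (tgt.length - k + j) := by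
  intro k
  induction k with
  | zero =>
    intro hk j hj
    have hj0 : j = 0 := by omega
    subst hj0
    have e1 : 0 - 0 + 1 = 1 := by omega
    have e2 : tgt.length - 0 + 0 = tgt.length := by omega
    rw [e1, e2]
    simp [dpListB, backtrackA]
  | succ k ih =>
    intro hk j hj
    have hB : ∀ c t, t ∈ (indexTowels ts tgt).getD c [] → t ≠ [] := by
      intro c t ht
      rcases (mem_bucket ts tgt t c).mp ht with ⟨_, _, r, rfl⟩
      exact List.cons_ne_nil _ _
    cases j with
    | succ j' =>
      have h1 : (dpListB ts tgt (k + 1)).getD (j' + 1) false =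
          (dpListB ts tgt k).getD j' false := by
        simp [dpListB]
      rw [h1, ih (by omega) j' (by omega)]
      have e1 : k - j' + 1 = k + 1 - (j' + 1) + 1 := by omega
      have e2 : tgt.length - k + j' = tgt.length - (k + 1) + (j' + 1) := by omega
      rw [e1, e2]
    | zero =>
      have e1 : k + 1 - 0 + 1 = (k + 1) + 1 := by omega
      rw [e1]
      have hi : tgt.length - (k + 1) + 0 = tgt.length - (k + 1) := by omega
      rw [hi]
      set i := tgt.length - (k + 1) with hidef
      have hik : i + (k + 1) = tgt.length := by omega
      have hiL : i < tgt.length := by omega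
      -- continuation values agree
      have cont : ∀ t : List Char, 0 < t.length → t.length ≤ k + 1 →
          (dpListB ts tgt k).getD (t.length - 1) false =
            backtrackA (indexTowels ts tgt) tgt (k + 1) (i + t.length) := by
        intro t h1 h2
        rw [ih (by omega) (t.length - 1) (by omega)]
        have e2 : tgt.length - k + (t.length - 1) = i + t.length := by omega
        rw [e2]
        exact bt_fuel _ _ hB tgt.length (i + t.length) _ _ (by omega) (by omega) (by omega)
      simp only [dpListB, List.getD_cons_zero]
      rw [bt_step, if_neg (by omega : ¬ i = tgt.length)]
      rw [List.getElem?_eq_getElem hiL]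
      rw [Bool.eq_iff_iff]
      simp only [List.any_eq_true]
      constructor
      · rintro ⟨t, htm, hF⟩
        rw [Bool.and_eq_true] at hF
        obtain ⟨hp, hm⟩ := hF
        cases t with
        | nil => simp at hm
        | cons c0 r0 =>
          have hpre : (c0 :: r0) <+: tgt.drop i := by
            simpa [pyStartsFromB, List.isPrefixOf_iff_prefix] using hp
          have hp' : pyStartsFrom tgt (c0 :: r0) i = true := by
            simpa [pyStartsFrom, List.isPrefixOf_iff_prefix] using hpre
          have hlen : r0.length + 1 ≤ k + 1 := by
            have := hpre.length_le
            simp only [List.length_drop, List.length_cons] at this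
            omega
          have hc0 : c0 = tgt[i] := by
            obtain ⟨s, hs⟩ := hpre
            have h0 : (tgt.drop i)[0]? = some c0 := by
              rw [← hs]; rfl
            rw [List.getElem?_drop, Nat.add_zero, List.getElem?_eq_getElem hiL] at h0
            exact (Option.some.injEq _ _ ▸ h0).symm
          have hin : PySem.Chars.isIn (c0 :: r0) tgt = true := by
            rw [PySem.Chars.isIn_iff_infix]
            exact hpre.isInfix.trans (tgt.drop_suffix i).isInfix
          refine ⟨c0 :: r0, (mem_bucket ts tgt _ tgt[i]).mpr ⟨htm, hin, r0, by rw [hc0]⟩, ?_⟩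
          rw [Bool.and_eq_true]
          refine ⟨hp', ?_⟩
          rw [← cont (c0 :: r0) (by simp) (by simpa using hlen)]
          exact hm
      · rintro ⟨t, htb, hG⟩
        obtain ⟨htm, hin, r, rfl⟩ := (mem_bucket ts tgt t tgt[i]).mp htb
        rw [Bool.and_eq_true] at hG
        obtain ⟨hp, hbt⟩ := hG
        have hpre : (tgt[i] :: r) <+: tgt.drop i := by
          simpa [pyStartsFrom, List.isPrefixOf_iff_prefix] using hp
        have hp' : pyStartsFromB tgt (tgt[i] :: r) i = true := by
          simpa [pyStartsFromB, List.isPrefixOf_iff_prefix] using hpre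
        have hlen : r.length + 1 ≤ k + 1 := by
          have := hpre.length_le
          simp only [List.length_drop, List.length_cons] at this
          omega
        refine ⟨tgt[i] :: r, htm, ?_⟩
        rw [Bool.and_eq_true]
        refine ⟨hp', ?_⟩
        show (dpListB ts tgt k).getD ((tgt[i] :: r).length - 1) false = true
        rw [cont (tgt[i] :: r) (by simp) (by simpa using hlen)]
        exact hbt

-- ===== VERDICT (by name: the statement is the Claim_ definition above) =====
theorem part1_spec : Claim_equal_part1 := by
  intro data _ hpre
  obtain ⟨hlen, hne⟩ := hpre
  unfold Spec_part1
  rcases hl : PySem.Chars.splitOn (PySem.Chars.strip data.toList) ['\n', '\n'] with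
    _ | ⟨a, _ | ⟨b, _ | ⟨x, rest⟩⟩⟩ <;> rw [hl] at hlen <;> simp at hlen
  rw [hl] at hne
  simp only [List.headI] at hne
  simp only [part1, part1_alt, hl]
  rw [if_pos (by simp : (([a, b] : List (List Char)).length = 2))]
  simp only [List.getD_cons_zero, List.getD_cons_succ]
  apply PySem.List.foldl_congr_mem
  intro acc p hp
  have hkey := dp_eq_bt (PySem.Chars.splitOn a [',', ' ']) p p.length le_rfl 0 (Nat.zero_le _)
  have e1 : p.length - 0 + 1 = p.length + 1 := by omega
  have e2 : p.length - p.length + 0 = 0 := by omega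
  rw [e1, e2] at hkey
  rw [hkey]
  cases backtrackA (indexTowels (PySem.Chars.splitOn a [',', ' ']) p) p (p.length + 1) 0 <;> simp
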